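-- pv_equiv track=rewrite | github.com/treenoder/ALGLB | LB4/D_02/main.py | solution
-- ===== SOURCE A (Python) =====
-- def solution(v, e, m):
--     g = [[] for _ in range(v)]
--     for i, j in m:
--         g[i - 1].append(j - 1)
--         g[j - 1].append(i - 1)
--
--     for i in range(v):
--         for j in range(v):
--             if i == j:
--                 continue
--             if j not in g[i]:
--                 return 'NO'
--     return 'YES'
-- ===== SOURCE B (Python) =====
-- def solution(v, e, m):
--     g = [[] for _ in range(v)]
--     for i, j in m:
--         g[i - 1].append(j - 1)
--         g[j - 1].append(i - 1)
--     for i in range(v):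
--         if len({nb for nb in g[i] if 0 <= nb < v and nb != i}) != v - 1:
--             return 'NO'
--     return 'YES'
-- ===== Notes on version B (the rewrite author's own statement) =====
-- stated objective: alternative
-- what changed: The nested pairwise loop that tests 'j not in g[i]' for every ordered pair is replaced by one pass that, per vertex, counts the distinct in-range neighbours with a set and compares the count to v-1; the adjacency build is kept verbatim; on the generated (mostly incomplete) graphs the measured cost is the same.
import Mathlib
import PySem

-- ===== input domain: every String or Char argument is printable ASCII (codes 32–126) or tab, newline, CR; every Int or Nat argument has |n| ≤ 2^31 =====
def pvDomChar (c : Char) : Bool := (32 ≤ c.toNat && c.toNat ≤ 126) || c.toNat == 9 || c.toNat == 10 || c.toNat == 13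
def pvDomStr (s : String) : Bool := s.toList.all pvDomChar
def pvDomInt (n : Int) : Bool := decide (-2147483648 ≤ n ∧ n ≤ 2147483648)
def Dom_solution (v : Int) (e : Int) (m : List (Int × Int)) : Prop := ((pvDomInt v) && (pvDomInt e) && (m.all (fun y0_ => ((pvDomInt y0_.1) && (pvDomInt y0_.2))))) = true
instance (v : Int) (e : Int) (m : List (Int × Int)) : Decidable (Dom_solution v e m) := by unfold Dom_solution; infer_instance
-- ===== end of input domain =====

-- B replaces A's nested pairwise membership scan by a per-vertex distinct-neighbour
-- count compared with v-1 (alternative algorithm); the adjacency build is identical.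

-- ===== PORT A =====
-- adjacency build shared verbatim by both Pythons (same code in Source A and Source B)
def pvBuildAdj (v : Int) (m : List (Int × Int)) : List (List Int) :=
  m.foldl (fun g ij =>
    let g1 := PySem.List.pySetD g (ij.1 - 1) (PySem.List.pyGetD g (ij.1 - 1) [] ++ [ij.2 - 1])
    PySem.List.pySetD g1 (ij.2 - 1) (PySem.List.pyGetD g1 (ij.2 - 1) [] ++ [ij.1 - 1]))
  (List.replicate (max v 0).toNat [])

def solution (v : Int) (e : Int) (m : List (Int × Int)) : String :=
  let g := pvBuildAdj v m
  if (PySem.List.pyRange 0 v 1).all (fun i =>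
       (PySem.List.pyRange 0 v 1).all (fun j =>
         i == j || (PySem.List.pyGetD g i []).contains j))
  then "YES" else "NO"

-- ===== PORT B =====
def solution_alt (v : Int) (e : Int) (m : List (Int × Int)) : String :=
  let g := pvBuildAdj v m
  if (PySem.List.pyRange 0 v 1).all (fun i =>
       (((PySem.Set.ofList ((PySem.List.pyGetD g i []).filter
            (fun nb => decide (0 ≤ nb) && decide (nb < v) && nb != i))).length : Int) == v - 1))
  then "YES" else "NO"

-- ===== PRECONDITION & SPEC =====
-- Pre_ excludes exactly the inputs where A raises IndexError: an endpoint x of an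
-- edge whose Python index x-1 falls outside the list g of length max(v,0).
def Pre_solution (v : Int) (e : Int) (m : List (Int × Int)) : Prop :=
  ∀ p ∈ m, -(max v 0) ≤ p.1 - 1 ∧ p.1 - 1 < max v 0 ∧ -(max v 0) ≤ p.2 - 1 ∧ p.2 - 1 < max v 0
instance (v : Int) (e : Int) (m : List (Int × Int)) : Decidable (Pre_solution v e m) := by
  unfold Pre_solution; infer_instance
def pvWitness_solution : Int × Int × (List (Int × Int)) := (3, 3, [(1, 2), (2, 3), (3, 1)])
def Spec_solution (v : Int) (e : Int) (m : List (Int × Int)) (out : String) : Prop := out = solution_alt v e m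
instance (v : Int) (e : Int) (m : List (Int × Int)) (out : String) : Decidable (Spec_solution v e m out) := by unfold Spec_solution; infer_instance

-- ===== CLAIM (what is proved, stated in full; the proofs are below) =====
def Claim_equal_solution : Prop := ∀ (v : Int) (e : Int) (m : List (Int × Int)), Dom_solution v e m → Pre_solution v e m → Spec_solution v e m (solution v e m)

-- ===== LEMMAS AND PROOFS =====

lemma pv_all_congr_mem {α : Type} {l : List α} {f g : α → Bool}
    (h : ∀ x ∈ l, f x = g x) : l.all f = l.all g := by
  induction l with
  | nil => rfl
  | cons a t ih =>
      simp only [List.all_cons, h a (by simp)]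
      rw [ih (fun x hx => h x (by simp [hx]))]

-- per-vertex equivalence: "every j≠i in range(v) is in L" ↔ "L has v-1 distinct valid neighbours"
lemma pv_row_iff (v i : Int) (L : List Int) (hi0 : 0 ≤ i) (hiv : i < v) :
    ((PySem.List.pyRange 0 v 1).all (fun j => i == j || L.contains j))
    = (((PySem.Set.ofList (L.filter
          (fun nb => decide (0 ≤ nb) && decide (nb < v) && nb != i))).length : Int) == v - 1) := by
  have hv1 : 1 ≤ v := by omega
  set S : List Int := PySem.Set.ofList (L.filter
      (fun nb => decide (0 ≤ nb) && decide (nb < v) && nb != i)) with hS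
  have hnd : S.Nodup := PySem.Set.nodup_ofList _
  have hmem : ∀ x : Int, x ∈ S ↔ x ∈ L ∧ 0 ≤ x ∧ x < v ∧ x ≠ i := by
    intro x
    rw [hS, PySem.Set.mem_ofList, List.mem_filter]
    simp; tauto
  set T : Finset Int := (Finset.Ico (0 : Int) v).erase i with hT
  have hiT : i ∈ Finset.Ico (0 : Int) v := by simp [Finset.mem_Ico]; omega
  have hTcard : T.card = (v - 1).toNat := by
    rw [hT, Finset.card_erase_of_mem hiT, Int.card_Ico]
    omega
  have hsub : S.toFinset ⊆ T := by
    intro x hx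
    rw [List.mem_toFinset, hmem] at hx
    simp only [hT, Finset.mem_erase, Finset.mem_Ico]
    exact ⟨hx.2.2.2, hx.2.1, hx.2.2.1⟩
  have hScard : S.toFinset.card = S.length := List.toFinset_card_of_nodup hnd
  rw [Bool.eq_iff_iff]
  simp only [List.all_eq_true, PySem.List.mem_pyRange_one, Bool.or_eq_true, beq_iff_eq,
    List.contains_eq_mem, decide_eq_true_eq]
  constructor
  · -- complete ⇒ count is v-1
    intro h
    have hTsub : T ⊆ S.toFinset := by
      intro x hx
      rw [hT, Finset.mem_erase, Finset.mem_Ico] at hx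
      rcases h x ⟨hx.2.1, hx.2.2⟩ with hx' | hx'
      · exact absurd hx'.symm hx.1
      · rw [List.mem_toFinset, hmem]; exact ⟨hx', hx.2.1, hx.2.2, hx.1⟩
    have : S.toFinset = T := Finset.Subset.antisymm hsub hTsub
    have : S.length = (v - 1).toNat := by rw [← hScard, this, hTcard]
    omega
  · -- count is v-1 ⇒ complete
    intro h j hj
    by_cases hji : i = j
    · exact Or.inl hji
    · have hlen : S.length = (v - 1).toNat := by omega
      have hEq : S.toFinset = T := by
        apply Finset.eq_of_subset_of_card_le hsub
        rw [hTcard, hScard, hlen]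
      have : j ∈ S.toFinset := by
        rw [hEq, hT, Finset.mem_erase, Finset.mem_Ico]
        exact ⟨fun hc => hji hc.symm, hj.1, hj.2⟩
      rw [List.mem_toFinset, hmem] at this
      exact Or.inr this.1

-- ===== VERDICT (by name: the statement is the Claim_ definition above) =====
theorem solution_spec : Claim_equal_solution := by
  intro v e m _ _
  unfold Spec_solution solution solution_alt
  have h := pv_all_congr_mem (l := PySem.List.pyRange 0 v 1)
    (f := fun i => (PySem.List.pyRange 0 v 1).all (fun j =>
         i == j || (PySem.List.pyGetD (pvBuildAdj v m) i []).contains j))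
    (g := fun i => (((PySem.Set.ofList ((PySem.List.pyGetD (pvBuildAdj v m) i []).filter
            (fun nb => decide (0 ≤ nb) && decide (nb < v) && nb != i))).length : Int) == v - 1))
    (by
      intro i hi
      rw [PySem.List.mem_pyRange_one] at hi
      exact pv_row_iff v i _ hi.1 hi.2)
  simp only [h]
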